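-- pv_equiv track=rewrite | github.com/Imperial-iGEM/DJANGO-Assembly-Methods | biobricks_assembly/biobricks10/bbinput.py | next_well
-- ===== SOURCE A (Python) =====
-- from typing import List, Dict, Tuple
--
-- def next_well(
--     wells_used: List[str]
-- ) -> str:
--     '''
--         Finds the next available well from a list of used wells
--         for a 96 well plate
--         Args:
--             List of wells used in 96 well plate
--         Returns:
--             Next unused well in 96 well plate
--     '''
--     letter = ['A', 'B', 'C', 'D', 'E', 'F', 'G', 'H']
--     well_avail = None
--     for i in range(96):
--         rowindex = i // 12
--         row = letter[rowindex]
--         col = (i % 12) + 1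
--         well = row + str(col)
--         if well in wells_used:
--             continue
--         else:
--             well_avail = well
--             break
--     if not well_avail:
--         raise ValueError('No empty wells')
--     return well_avail
-- ===== SOURCE B (Python) =====
-- def next_well(wells_used):
--     '''Set-complement + argmin re-implementation (different structure from the scan).'''
--     letters = ['A', 'B', 'C', 'D', 'E', 'F', 'G', 'H']
--     all_wells = [L + str(c) for L in letters for c in range(1, 13)]
--     remaining = set(all_wells) - set(wells_used)
--     if not remaining:
--         raise ValueError('No empty wells')
--     return min(remaining, key=all_wells.index)
-- ===== Notes on version B (the rewrite author's own statement) =====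
-- stated objective: alternative
-- what changed: Replaces A's ordered early-exit scan over the 96 plate positions (with a list-membership test per position) by building the full plate once, taking the set complement of set(wells_used), and returning the argmin of the remainder in plate order.
import Mathlib
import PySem

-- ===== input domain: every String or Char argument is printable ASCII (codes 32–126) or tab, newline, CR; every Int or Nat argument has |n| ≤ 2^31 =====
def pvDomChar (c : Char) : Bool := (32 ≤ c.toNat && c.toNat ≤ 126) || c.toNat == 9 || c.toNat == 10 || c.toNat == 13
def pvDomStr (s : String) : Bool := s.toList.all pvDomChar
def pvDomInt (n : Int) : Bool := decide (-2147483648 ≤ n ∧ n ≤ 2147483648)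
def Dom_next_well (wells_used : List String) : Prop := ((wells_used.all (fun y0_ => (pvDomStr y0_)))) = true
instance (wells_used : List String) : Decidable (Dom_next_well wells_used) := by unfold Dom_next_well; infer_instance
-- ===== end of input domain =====

-- B replaces A's ordered early-exit scan by a set complement (all 96 wells minus the used ones)
-- followed by an argmin over plate order; equivalence of return values is proved on Pre_ (A raises when the plate is full).

-- ===== PORT A =====
def nwLetter : List String := ["A", "B", "C", "D", "E", "F", "G", "H"]

-- A's 'for i in range(96): … continue/break' loop, as structural recursion on the range list
def nwLoop (wells_used : List String) : List Int → Option String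
  | [] => none
  | i :: rest =>
      let rowindex := PySem.Int.floordiv i 12
      let row := PySem.List.pyGetD nwLetter rowindex ""
      let col := PySem.Int.mod i 12 + 1
      let well := row ++ PySem.Int.toStr col
      if well ∈ wells_used then nwLoop wells_used rest
      else some well

def next_well (wells_used : List String) : String :=
  (nwLoop wells_used (PySem.List.pyRange 0 96 1)).getD ""  -- none = ValueError('No empty wells'), excluded by Pre_

-- ===== PORT B =====
-- [L + str(c) for L in letters for c in range(1, 13)]
def nwAllWells : List String :=
  ["A", "B", "C", "D", "E", "F", "G", "H"].flatMap
    (fun L => (PySem.List.pyRange 1 13 1).map (fun c => L ++ PySem.Int.toStr c))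

def next_well_alt (wells_used : List String) : String :=
  let remaining := PySem.Set.diff (PySem.Set.ofList nwAllWells) wells_used
  -- min(remaining, key=all_wells.index); every member of remaining occurs in all_wells, so index never raises
  (PySem.List.min? remaining (fun w => (PySem.List.index? nwAllWells w).getD 0)).getD ""
  -- none = ValueError('No empty wells'), excluded by Pre_

-- ===== PRECONDITION & SPEC =====
-- Pre_ excludes exactly the inputs containing all 96 well names, on which Python A (and B) raises ValueError.
def Pre_next_well (wells_used : List String) : Prop := ¬ (∀ w ∈ nwAllWells, w ∈ wells_used)
instance (wells_used : List String) : Decidable (Pre_next_well wells_used) := by unfold Pre_next_well; infer_instance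
def pvWitness_next_well : List String := (["A1", "A2"])

def Spec_next_well (wells_used : List String) (out : String) : Prop := out = next_well_alt wells_used
instance (wells_used : List String) (out : String) : Decidable (Spec_next_well wells_used out) := by unfold Spec_next_well; infer_instance

-- ===== CLAIM (what is proved, stated in full; the proofs are below) =====
def Claim_equal_next_well : Prop := ∀ (wells_used : List String), Dom_next_well wells_used → Pre_next_well wells_used → Spec_next_well wells_used (next_well wells_used)

-- ===== LEMMAS AND PROOFS =====

-- A's loop is find? over the list of well names generated by the range
lemma nwLoop_eq_find? (u : List String) (r : List Int) :
    nwLoop u r = (r.map (fun i => PySem.List.pyGetD nwLetter (PySem.Int.floordiv i 12) ""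
        ++ PySem.Int.toStr (PySem.Int.mod i 12 + 1))).find? (fun w => !(decide (w ∈ u))) := by
  induction r with
  | nil => rfl
  | cons i rest ih =>
      simp only [nwLoop, List.map_cons, List.find?_cons]
      by_cases h : (PySem.List.pyGetD nwLetter (PySem.Int.floordiv i 12) ""
          ++ PySem.Int.toStr (PySem.Int.mod i 12 + 1)) ∈ u
      · simp only [h, if_true, decide_true, Bool.not_true]
        exact ih
      · simp only [h, if_false, decide_false, Bool.not_false]

set_option maxRecDepth 8192 in
lemma map_range_eq_allWells :
    (PySem.List.pyRange 0 96 1).map (fun i => PySem.List.pyGetD nwLetter (PySem.Int.floordiv i 12) ""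
        ++ PySem.Int.toStr (PySem.Int.mod i 12 + 1)) = nwAllWells := by decide

set_option maxRecDepth 8192 in
lemma allWells_nodup : nwAllWells.Nodup := by decide

set_option maxRecDepth 8192 in
lemma ofList_allWells : PySem.Set.ofList nwAllWells = nwAllWells := by decide

-- min? of a list whose key is strictly increasing is its head
lemma min?_eq_head? {α : Type} (key : α → Nat) (l : List α)
    (h : l.Pairwise (fun a b => key a < key b)) : PySem.List.min? l key = l.head? := by
  cases l with
  | nil => rfl
  | cons x t =>
      simp only [PySem.List.min?, List.foldl_cons, List.head?_cons]
      have hx : ∀ y ∈ t, ¬ key y < key x := by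
        intro y hy
        exact not_lt_of_gt ((List.pairwise_cons.mp h).1 y hy)
      induction t with
      | nil => rfl
      | cons z s ihs =>
          have hz : ¬ key z < key x := hx z (by simp)
          simp only [List.foldl_cons, hz, if_false]
          exact ihs (h.sublist (List.Sublist.cons₂ x (List.sublist_cons_self z s)))
            (fun y hy => hx y (List.mem_cons_of_mem z hy))

-- the index key is strictly increasing along nwAllWells
lemma allWells_pairwise :
    nwAllWells.Pairwise (fun a b =>
      (PySem.List.index? nwAllWells a).getD 0 < (PySem.List.index? nwAllWells b).getD 0) := by
  rw [List.pairwise_iff_getElem]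
  intro i j hi hj hij
  have key : ∀ (k : Nat) (hk : k < nwAllWells.length),
      List.idxOf? nwAllWells[k] nwAllWells = some k := by
    intro k hk
    rw [List.idxOf?_eq_some_iff]
    refine ⟨hk, rfl, fun m hm he => ?_⟩
    have := (List.Nodup.getElem_inj_iff allWells_nodup).mp he
    omega
  simp [PySem.List.index?_eq_idxOf?, key i hi, key j hj, hij]

-- ===== VERDICT (by name: the statement is the Claim_ definition above) =====
theorem next_well_spec : Claim_equal_next_well := by
  intro u _ _
  show next_well u = next_well_alt u
  unfold next_well next_well_alt
  rw [nwLoop_eq_find?, map_range_eq_allWells, ← List.head?_filter]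
  simp only [PySem.Set.diff, ofList_allWells]
  rw [min?_eq_head? _ _ (allWells_pairwise.filter _)]
  congr 1
  refine congrArg List.head? (List.filter_congr ?_)
  intro w _
  simp [PySem.Set.contains]
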